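-- pv_equiv track=rewrite | github.com/Juyoung4/StudyAlgorithm | Programmers/LEVEL2/python/11.py | solution
-- ===== SOURCE A (Python) =====
-- def solution(n):
--     answer = ''
--     three = 0
--     temp = 0
--     while temp + 3**three <= n:
--         temp += 3**three
--         three += 1
--     # 자릿 수 : three / 시작 부터 몇 번째 수 : n-temp+1
--     jump = n-temp+1
--     temp = three-1
--     for _ in range(three):
--         threes = 3**temp
--         if 1 <= jump <= threes: # 1 _ _
--             answer += str(1)
--         elif threes < jump <= threes*2:
--             answer += str(2)
--             jump -= threes
--         else:
--             answer += str(4)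
--             jump -= threes*2
--         temp -= 1
--     return answer
-- ===== SOURCE B (Python) =====
-- def solution(n):
--     answer = ''
--     while n > 0:
--         n, r = divmod(n, 3)
--         if r == 0:
--             n -= 1
--             answer = '4' + answer
--         else:
--             answer = str(r) + answer
--     return answer
-- ===== Notes on version B (the rewrite author's own statement) =====
-- stated objective: simpler
-- what changed: Replaces A's two-phase scheme (count digits by summing powers of 3, then extract digits MSB-first by comparing against powers of 3) with a single textbook repeated-division loop building digits LSB-first with a borrow (when the remainder is zero it writes the digit four and decrements the quotient); no powers of 3 are computed.
import Mathlib
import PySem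

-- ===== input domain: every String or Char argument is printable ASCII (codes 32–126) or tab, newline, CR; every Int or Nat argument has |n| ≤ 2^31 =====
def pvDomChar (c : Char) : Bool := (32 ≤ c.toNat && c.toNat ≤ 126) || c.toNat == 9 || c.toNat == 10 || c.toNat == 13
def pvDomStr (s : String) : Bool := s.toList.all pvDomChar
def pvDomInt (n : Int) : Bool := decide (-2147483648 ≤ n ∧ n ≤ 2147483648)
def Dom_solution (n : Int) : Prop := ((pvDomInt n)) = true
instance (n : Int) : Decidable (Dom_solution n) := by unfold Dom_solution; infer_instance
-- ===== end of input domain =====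

-- B replaces A's count-digits-then-extract-MSB-first scheme by one repeated-division
-- loop that builds the digits LSB-first with a borrow: objective 'simpler'.

-- ===== PORT A =====
-- the `while temp + 3**three <= n` loop of A
def aLoop1 (n temp : Int) (three : Nat) : Int × Nat :=
  if temp + 3 ^ three ≤ n then aLoop1 n (temp + 3 ^ three) (three + 1) else (temp, three)
termination_by (n - temp).toNat
decreasing_by
  have : (1:Int) ≤ 3 ^ three := one_le_pow₀ (by norm_num)
  omega

-- the `for _ in range(three)` loop of A; `k` counts the remaining iterations, so the
-- Python variable `temp` equals `k - 1` at each iteration (it runs three-1 down to 0)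
def aLoop2 (k : Nat) (jump : Int) (answer : String) : String :=
  match k with
  | 0 => answer
  | t + 1 =>
    let threes : Int := 3 ^ t
    if 1 ≤ jump ∧ jump ≤ threes then aLoop2 t jump (answer ++ "1")
    else if threes < jump ∧ jump ≤ threes * 2 then aLoop2 t (jump - threes) (answer ++ "2")
    else aLoop2 t (jump - threes * 2) (answer ++ "4")

def solution (n : Int) : String :=
  let r := aLoop1 n 0 0
  let jump := n - r.1 + 1
  aLoop2 r.2 jump ""

-- ===== PORT B =====
-- the `while n > 0` loop of B
def bLoop (n : Int) (answer : String) : String :=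
  if 0 < n then
    let q := PySem.Int.floordiv n 3
    let r := PySem.Int.mod n 3
    if r = 0 then bLoop (q - 1) ("4" ++ answer)
    else bLoop q (PySem.Int.toStr r ++ answer)
  else answer
termination_by n.toNat
decreasing_by
  all_goals
    rw [PySem.Int.floordiv_eq_ediv_of_pos (by norm_num)]
    omega

def solution_alt (n : Int) : String := bLoop n ""

-- ===== PRECONDITION & SPEC =====
def Spec_solution (n : Int) (out : String) : Prop := out = solution_alt n
instance (n : Int) (out : String) : Decidable (Spec_solution n out) := by unfold Spec_solution; infer_instance

-- ===== CLAIM (what is proved, stated in full; the proofs are below) =====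
def Claim_equal_solution : Prop := ∀ (n : Int), Dom_solution n → Spec_solution n (solution n)

-- ===== LEMMAS AND PROOFS =====

-- pvS k = 1 + 3 + … + 3^(k-1), the value of A's `temp` after k iterations of the first loop
def pvS : Nat → Int
  | 0 => 0
  | k + 1 => pvS k + 3 ^ k

-- the digit written for a least-significant residue b = (jump-1) % 3
def pvDigit (b : Int) : String := if b = 0 then "1" else if b = 1 then "2" else "4"

theorem pvS_nonneg (k : Nat) : 0 ≤ pvS k := by
  induction k with
  | zero => simp [pvS]
  | succ t ih => have : (0:Int) ≤ 3 ^ t := by positivity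
                 simp [pvS]; omega

theorem pvS_succ' (k : Nat) : pvS (k + 1) = 3 * pvS k + 1 := by
  induction k with
  | zero => simp [pvS]
  | succ t ih => show pvS (t+1) + 3 ^ (t+1) = 3 * pvS (t+1) + 1
                 rw [show pvS (t+1) = pvS t + 3 ^ t from rfl] at *
                 push_cast [pow_succ] at *
                 linarith

theorem aLoop1_spec (n : Int) : ∀ (temp : Int) (three : Nat), temp = pvS three → temp ≤ n →
    ∃ k, aLoop1 n temp three = (pvS k, k) ∧ pvS k ≤ n ∧ n < pvS k + 3 ^ k := by
  intro temp three
  induction temp, three using aLoop1.induct (n := n) with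
  | case1 temp three hle ih =>
    intro hS _
    rw [aLoop1, if_pos hle]
    exact ih (by simp [hS, pvS]) (by omega)
  | case2 temp three hle =>
    intro hS htemp
    exact ⟨three, by rw [aLoop1, if_neg hle, hS], by omega, by omega⟩

theorem aLoop2_succ (t : Nat) (j : Int) (a : String) : aLoop2 (t + 1) j a =
    (if 1 ≤ j ∧ j ≤ (3:Int) ^ t then aLoop2 t j (a ++ "1")
     else if (3:Int) ^ t < j ∧ j ≤ (3:Int) ^ t * 2 then aLoop2 t (j - 3 ^ t) (a ++ "2")
     else aLoop2 t (j - 3 ^ t * 2) (a ++ "4")) := rfl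

theorem aLoop2_append (k : Nat) : ∀ (j : Int) (s : String),
    aLoop2 k j s = s ++ aLoop2 k j "" := by
  induction k with
  | zero => intro j s; simp [aLoop2]
  | succ t ih =>
    intro j s
    rw [aLoop2_succ, aLoop2_succ]
    split_ifs <;>
      rw [ih _ (s ++ _), ih _ ("" ++ _), String.empty_append, String.append_assoc]

-- the LSB-first recurrence satisfied by A's MSB-first extraction loop
theorem aLoop2_lsb : ∀ (k : Nat) (j : Int), 1 ≤ j → j ≤ 3 ^ (k + 1) →
    aLoop2 (k + 1) j "" = aLoop2 k ((j - 1) / 3 + 1) "" ++ pvDigit ((j - 1) % 3) := by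
  intro k
  induction k with
  | zero =>
    intro j h1 h3
    have : j = 1 ∨ j = 2 ∨ j = 3 := by omega
    rcases this with rfl | rfl | rfl <;> decide
  | succ t ih =>
    intro j h1 h9
    have hP : (1:Int) ≤ 3 ^ t := one_le_pow₀ (by norm_num)
    have hpow1 : (3:Int) ^ (t + 1) = 3 * 3 ^ t := by ring
    have hpow2 : (3:Int) ^ (t + 2) = 9 * 3 ^ t := by ring
    rw [hpow2] at h9
    -- peel the first digit on both sides
    rw [show aLoop2 (t + 1 + 1) j "" = _ from aLoop2_succ (t + 1) j "",
        aLoop2_succ t ((j - 1) / 3 + 1) ""]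
    by_cases c1 : 1 ≤ j ∧ j ≤ (3:Int) ^ (t + 1)
    · have hb : 1 ≤ (j-1)/3 + 1 ∧ (j-1)/3 + 1 ≤ (3:Int) ^ t := by
        rw [hpow1] at c1; constructor <;> omega
      rw [if_pos c1, if_pos hb, aLoop2_append (t+1) j ("" ++ "1"), ih j c1.1 c1.2,
          aLoop2_append t ((j-1)/3 + 1) ("" ++ "1")]
      simp [String.append_assoc]
    · by_cases c2 : (3:Int) ^ (t + 1) < j ∧ j ≤ (3:Int) ^ (t + 1) * 2
      · have hb1 : ¬(1 ≤ (j-1)/3 + 1 ∧ (j-1)/3 + 1 ≤ (3:Int) ^ t) := by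
          rw [hpow1] at c2; omega
        have hb2 : (3:Int) ^ t < (j-1)/3 + 1 ∧ (j-1)/3 + 1 ≤ (3:Int) ^ t * 2 := by
          rw [hpow1] at c2; constructor <;> omega
        rw [if_neg c1, if_pos c2, if_neg hb1, if_pos hb2]
        rw [aLoop2_append (t+1) (j - 3 ^ (t+1)) ("" ++ "2"),
            ih (j - 3 ^ (t+1)) (by rw [hpow1] at c2 ⊢; omega) (by rw [hpow1] at c2 ⊢; omega),
            aLoop2_append t ((j-1)/3 + 1 - 3 ^ t) ("" ++ "2")]
        have e1 : (j - 3 ^ (t+1) - 1) / 3 + 1 = (j-1)/3 + 1 - 3 ^ t := by rw [hpow1]; omega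
        have e2 : (j - 3 ^ (t+1) - 1) % 3 = (j - 1) % 3 := by rw [hpow1]; omega
        rw [e1, e2]
        simp [String.append_assoc]
      · have hb1 : ¬(1 ≤ (j-1)/3 + 1 ∧ (j-1)/3 + 1 ≤ (3:Int) ^ t) := by
          rw [hpow1] at c1 c2; omega
        have hb2 : ¬((3:Int) ^ t < (j-1)/3 + 1 ∧ (j-1)/3 + 1 ≤ (3:Int) ^ t * 2) := by
          rw [hpow1] at c1 c2; omega
        rw [if_neg c1, if_neg c2, if_neg hb1, if_neg hb2]
        rw [aLoop2_append (t+1) (j - 3 ^ (t+1) * 2) ("" ++ "4"),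
            ih (j - 3 ^ (t+1) * 2) (by rw [hpow1] at c1 c2 ⊢; omega)
              (by rw [hpow1] at c1 c2 ⊢; omega),
            aLoop2_append t ((j-1)/3 + 1 - 3 ^ t * 2) ("" ++ "4")]
        have e1 : (j - 3 ^ (t+1) * 2 - 1) / 3 + 1 = (j-1)/3 + 1 - 3 ^ t * 2 := by rw [hpow1]; omega
        have e2 : (j - 3 ^ (t+1) * 2 - 1) % 3 = (j - 1) % 3 := by rw [hpow1]; omega
        rw [e1, e2]
        simp [String.append_assoc]

theorem bLoop_eq : ∀ (k : Nat) (j : Int) (acc : String), 1 ≤ j → j ≤ 3 ^ k →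
    bLoop (pvS k + j - 1) acc = aLoop2 k j "" ++ acc := by
  intro k
  induction k with
  | zero =>
    intro j acc h1 h3
    have : j = 1 := by omega
    subst this
    rw [bLoop]
    simp [pvS, aLoop2, String.empty_append]
  | succ t ih =>
    intro j acc h1 h3
    have hP : (1:Int) ≤ 3 ^ t := one_le_pow₀ (by norm_num)
    have hS : 0 ≤ pvS t := pvS_nonneg t
    have hn : pvS (t + 1) + j - 1 = 3 * pvS t + j := by rw [pvS_succ']; ring
    have hpow : (3:Int) ^ (t + 1) = 3 * 3 ^ t := by ring
    rw [hpow] at h3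
    rw [bLoop, if_pos (by omega)]
    rw [PySem.Int.floordiv_eq_ediv_of_pos (by norm_num), PySem.Int.mod_eq_emod_of_pos (by norm_num)]
    simp only []
    rw [aLoop2_lsb t j h1 (by omega)]
    set j' : Int := (j - 1) / 3 + 1 with hj'
    have hj'1 : 1 ≤ j' := by omega
    have hj'3 : j' ≤ 3 ^ t := by omega
    have hmod3 : (pvS (t+1) + j - 1) % 3 = (j - 1 + 1) % 3 := by rw [hn]; omega
    by_cases hb : (j - 1) % 3 = 2
    · rw [if_pos (by omega)]
      have hq : (pvS (t+1) + j - 1) / 3 - 1 = pvS t + j' - 1 := by rw [hn]; omega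
      rw [hq, ih j' _ hj'1 hj'3, show pvDigit ((j-1) % 3) = "4" by rw [hb]; rfl,
          String.append_assoc]
    · rw [if_neg (by omega)]
      have hq : (pvS (t+1) + j - 1) / 3 = pvS t + j' - 1 := by rw [hn]; omega
      rw [hq]
      by_cases hb1 : (j - 1) % 3 = 0
      · rw [show PySem.Int.toStr ((pvS (t+1) + j - 1) % 3) = "1" by
            rw [show (pvS (t+1) + j - 1) % 3 = 1 by omega]; rfl]
        rw [ih j' _ hj'1 hj'3, show pvDigit ((j-1) % 3) = "1" by rw [hb1]; rfl,
            String.append_assoc]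
      · rw [show PySem.Int.toStr ((pvS (t+1) + j - 1) % 3) = "2" by
            rw [show (pvS (t+1) + j - 1) % 3 = 2 by omega]; rfl]
        rw [ih j' _ hj'1 hj'3, show pvDigit ((j-1) % 3) = "2" by
            rw [show (j-1) % 3 = 1 by omega]; rfl,
            String.append_assoc]

-- ===== VERDICT (by name: the statement is the Claim_ definition above) =====
theorem solution_spec : Claim_equal_solution := by
  intro n _
  unfold Spec_solution solution solution_alt
  by_cases hpos : 1 ≤ n
  · obtain ⟨k, hrun, hlo, hhi⟩ := aLoop1_spec n 0 0 rfl (by omega)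
    rw [hrun]
    simp only []
    have h1 : 1 ≤ n - pvS k + 1 := by omega
    have h3 : n - pvS k + 1 ≤ 3 ^ k := by omega
    have := bLoop_eq k (n - pvS k + 1) "" h1 h3
    rw [show pvS k + (n - pvS k + 1) - 1 = n by ring] at this
    rw [this, String.append_empty]
  · rw [show aLoop1 n 0 0 = (0, 0) by rw [aLoop1]; rw [if_neg (by norm_num; omega)]]
    rw [bLoop, if_neg (by omega)]
    rfl
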